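-- pv_equiv track=rewrite | github.com/galaxy821/Algorithm | Implementation/pg/pg_72138.py | cal_gene
-- ===== SOURCE A (Python) =====
-- def cal_gene(pose):
--     n, p = pose
--     stack = []
--
--     p -= 1
--     while n > 1:
--         stack.append(p % 4)
--         n -= 1
--         p //= 4
--
--     while stack:
--         num = stack.pop()
--         if num == 0:
--             return "RR"
--         elif num == 3:
--             return "rr"
--     return "Rr"
-- ===== SOURCE B (Python) =====
-- def cal_gene(pose):
--     n, p = pose
--     p -= 1
--     gene = "Rr"
--     while n > 1:
--         d = p % 4
--         if d == 0:
--             gene = "RR"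
--         elif d == 3:
--             gene = "rr"
--         p //= 4
--         n -= 1
--     return gene
-- ===== Notes on version B (the rewrite author's own statement) =====
-- stated objective: simpler
-- what changed: Replaces the build-a-stack-then-pop-and-early-return two-phase scan with a single stackless loop that overwrites a candidate answer while extracting base-4 digits least-significant first (the last overwrite is the most-significant decisive digit).
import Mathlib
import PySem

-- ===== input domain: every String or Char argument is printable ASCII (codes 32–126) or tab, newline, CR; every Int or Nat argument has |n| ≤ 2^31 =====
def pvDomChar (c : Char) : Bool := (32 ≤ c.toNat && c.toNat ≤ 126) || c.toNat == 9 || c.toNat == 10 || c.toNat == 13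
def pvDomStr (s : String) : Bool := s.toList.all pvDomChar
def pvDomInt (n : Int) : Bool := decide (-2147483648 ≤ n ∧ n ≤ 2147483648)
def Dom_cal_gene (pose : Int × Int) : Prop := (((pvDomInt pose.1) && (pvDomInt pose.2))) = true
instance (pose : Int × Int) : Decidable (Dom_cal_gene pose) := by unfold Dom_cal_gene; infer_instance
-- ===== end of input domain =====

-- ===== PORT A =====
-- B eliminates A's stack: one loop over the base-4 digits (LSB first) overwriting a candidate; objective: simpler (O(1) space).
-- In A, 'while n > 1' runs (n-1).toNat iterations; that counter is the Nat fuel here, the rest of the state (p, stack) is A's.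
def pvBuildA : Nat → Int → List Int → List Int
  | 0, _, s => s
  | k+1, p, s => pvBuildA k (PySem.Int.floordiv p 4) (s ++ [PySem.Int.mod p 4])

-- 'while stack: num = stack.pop()' pops from the END of the stack, so it scans stack.reverse front-to-back.
def pvScanA : List Int → String
  | [] => "Rr"
  | d :: rest => if d = 0 then "RR" else if d = 3 then "rr" else pvScanA rest

def cal_gene (pose : Int × Int) : String :=
  let n := pose.1
  let p := pose.2 - 1
  pvScanA (pvBuildA (n-1).toNat p []).reverse

-- ===== PORT B =====
def pvLoopB : Nat → Int → String → String
  | 0, _, gene => gene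
  | k+1, p, gene =>
    let d := PySem.Int.mod p 4
    pvLoopB k (PySem.Int.floordiv p 4)
      (if d = 0 then "RR" else if d = 3 then "rr" else gene)

def cal_gene_alt (pose : Int × Int) : String :=
  pvLoopB (pose.1 - 1).toNat (pose.2 - 1) "Rr"

-- ===== PRECONDITION & SPEC =====
def Spec_cal_gene (pose : Int × Int) (out : String) : Prop := out = cal_gene_alt pose
instance (pose : Int × Int) (out : String) : Decidable (Spec_cal_gene pose out) := by unfold Spec_cal_gene; infer_instance

-- ===== CLAIM (what is proved, stated in full; the proofs are below) =====
def Claim_equal_cal_gene : Prop := ∀ (pose : Int × Int), Dom_cal_gene pose → Spec_cal_gene pose (cal_gene pose)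

-- ===== LEMMAS AND PROOFS =====
-- scan with an explicit default (the candidate): pvScanA is scanD with default "Rr".
def pvScanD (xs : List Int) (c : String) : String :=
  match xs with
  | [] => c
  | d :: rest => if d = 0 then "RR" else if d = 3 then "rr" else pvScanD rest c

theorem pvScanA_eq_scanD (xs : List Int) : pvScanA xs = pvScanD xs "Rr" := by
  induction xs with
  | nil => rfl
  | cons d rest ih => simp [pvScanA, pvScanD, ih]

theorem pvScanD_append_last (xs : List Int) (d : Int) (c : String) :
    pvScanD (xs ++ [d]) c
      = pvScanD xs (if d = 0 then "RR" else if d = 3 then "rr" else c) := by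
  induction xs with
  | nil => simp [pvScanD]
  | cons x rest ih => simp [pvScanD, ih]

theorem pvBuildA_acc (k : Nat) : ∀ (p : Int) (s : List Int),
    pvBuildA k p s = s ++ pvBuildA k p [] := by
  induction k with
  | zero => intro p s; simp [pvBuildA]
  | succ k ih =>
    intro p s
    simp only [pvBuildA]
    rw [ih _ (s ++ [PySem.Int.mod p 4]), ih _ ([] ++ [PySem.Int.mod p 4])]
    simp

theorem pvLoopB_eq_scanD (k : Nat) : ∀ (p : Int) (c : String),
    pvLoopB k p c = pvScanD (pvBuildA k p []).reverse c := by
  induction k with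
  | zero => intro p c; rfl
  | succ k ih =>
    intro p c
    simp only [pvLoopB, pvBuildA, List.nil_append]
    rw [pvBuildA_acc k (PySem.Int.floordiv p 4) [PySem.Int.mod p 4]]
    simp only [List.reverse_append, List.reverse_singleton, List.singleton_append,
      List.reverse_cons]
    rw [pvScanD_append_last, ih]

-- ===== VERDICT (by name: the statement is the Claim_ definition above) =====
theorem cal_gene_spec : Claim_equal_cal_gene := by
  intro pose _
  show cal_gene pose = cal_gene_alt pose
  simp only [cal_gene, cal_gene_alt]
  rw [pvScanA_eq_scanD, pvLoopB_eq_scanD]
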